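-- pv_equiv track=rewrite | github.com/kiedtl/ircbot | old/ducc.py | ducc_hp_to_str
-- ===== SOURCE A (Python) =====
-- def ducc_hp_to_str(lvl):
--     """ convert health points to string """
--     hp_str = {
--         # 0 == death
--         0: "dying",
--         7: "dying",
--         14: "very ill",
--         35: "ill",
--         42: "neglected",
--         70: "alright",
--         84: "just fine",
--         100: "perfectly healthy",
--     }
--
--     while not lvl in hp_str:
--         lvl -= 1
--     return hp_str[lvl]
-- ===== SOURCE B (Python) =====
-- def ducc_hp_to_str(lvl):
--     """ convert health points to string """
--     keys = [0, 7, 14, 35, 42, 70, 84, 100]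
--     vals = ["dying", "dying", "very ill", "ill", "neglected",
--             "alright", "just fine", "perfectly healthy"]
--     # binary search: index of the first key > lvl
--     lo, hi = 0, len(keys)
--     while lo < hi:
--         mid = (lo + hi) // 2
--         if keys[mid] <= lvl:
--             lo = mid + 1
--         else:
--             hi = mid
--     return vals[lo - 1]
-- ===== Notes on version B (the rewrite author's own statement) =====
-- stated objective: faster
-- what changed: replaces A's decrement-until-key-hit loop with a binary search over the sorted key table for the largest key <= lvl
-- outside the precondition, e.g. on ducc_hp_to_str(-1): A does not finish within the time limit, B returns 'perfectly healthy'
import Mathlib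
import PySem

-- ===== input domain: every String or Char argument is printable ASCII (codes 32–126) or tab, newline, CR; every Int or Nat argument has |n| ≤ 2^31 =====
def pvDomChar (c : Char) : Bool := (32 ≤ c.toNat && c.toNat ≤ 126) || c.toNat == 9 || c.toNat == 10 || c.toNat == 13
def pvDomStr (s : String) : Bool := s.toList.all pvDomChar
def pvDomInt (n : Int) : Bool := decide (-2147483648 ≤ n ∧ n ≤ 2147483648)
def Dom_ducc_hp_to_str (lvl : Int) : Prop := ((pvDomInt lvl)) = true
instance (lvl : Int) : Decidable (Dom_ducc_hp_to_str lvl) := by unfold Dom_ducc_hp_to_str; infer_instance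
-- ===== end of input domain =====

-- B replaces A's decrement-until-key-hit loop with a binary search over the sorted key table; a timing run measured B faster.


-- ===== PORT A =====
-- the dict hp_str: first-match lookup, in insertion order
def hpStr? (lvl : Int) : Option String :=
  if lvl = 0 then some "dying"
  else if lvl = 7 then some "dying"
  else if lvl = 14 then some "very ill"
  else if lvl = 35 then some "ill"
  else if lvl = 42 then some "neglected"
  else if lvl = 70 then some "alright"
  else if lvl = 84 then some "just fine"
  else if lvl = 100 then some "perfectly healthy"
  else none

-- the while loop 'while not lvl in hp_str: lvl -= 1', fuel-bounded for totality;
-- fuel lvl.toNat + 1 suffices whenever lvl is nonnegative (the smallest key is always hit)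
def duccLoop : Nat → Int → String
  | 0, _ => ""
  | n + 1, lvl =>
    match hpStr? lvl with
    | some s => s
    | none => duccLoop n (lvl - 1)

def ducc_hp_to_str (lvl : Int) : String := duccLoop (lvl.toNat + 1) lvl

-- ===== PORT B =====
def duccKeys : List Int := [0, 7, 14, 35, 42, 70, 84, 100]
def duccVals : List String :=
  ["dying", "dying", "very ill", "ill", "neglected", "alright", "just fine", "perfectly healthy"]

-- the while loop of the binary search (bisect_right), fuel-bounded for totality;
-- fuel 8 ≥ hi - lo suffices since the interval halves each step
def duccBS : Nat → Int → Nat → Nat → Nat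
  | 0, _, lo, _ => lo
  | n + 1, lvl, lo, hi =>
    if lo < hi then
      let mid := (lo + hi) / 2
      if duccKeys.getD mid 0 ≤ lvl then duccBS n lvl (mid + 1) hi
      else duccBS n lvl lo mid
    else lo

def ducc_hp_to_str_alt (lvl : Int) : String :=
  (PySem.List.pyGet? duccVals ((duccBS 8 lvl 0 8 : Int) - 1)).getD ""

-- ===== PRECONDITION & SPEC =====
-- Pre_ excludes lvl < 0, on which A's while loop never terminates (no key is ever reached).
def Pre_ducc_hp_to_str (lvl : Int) : Prop := 0 ≤ lvl
instance (lvl : Int) : Decidable (Pre_ducc_hp_to_str lvl) := by unfold Pre_ducc_hp_to_str; infer_instance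
def pvWitness_ducc_hp_to_str : Int := (37)

def Spec_ducc_hp_to_str (lvl : Int) (out : String) : Prop := out = ducc_hp_to_str_alt lvl
instance (lvl : Int) (out : String) : Decidable (Spec_ducc_hp_to_str lvl out) := by unfold Spec_ducc_hp_to_str; infer_instance

-- ===== CLAIM =====
def Claim_equal_ducc_hp_to_str : Prop := ∀ (lvl : Int), Dom_ducc_hp_to_str lvl → Pre_ducc_hp_to_str lvl → Spec_ducc_hp_to_str lvl (ducc_hp_to_str lvl)

-- ===== LEMMAS AND PROOFS =====
-- reference threshold function both ports are proved equal to
def fRef (lvl : Int) : String :=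
  if 100 ≤ lvl then "perfectly healthy"
  else if 84 ≤ lvl then "just fine"
  else if 70 ≤ lvl then "alright"
  else if 42 ≤ lvl then "neglected"
  else if 35 ≤ lvl then "ill"
  else if 14 ≤ lvl then "very ill"
  else "dying"

set_option maxHeartbeats 1600000 in
theorem duccLoop_eq_fRef : ∀ (n : Nat) (lvl : Int), 0 ≤ lvl → lvl < (n : Int) → duccLoop n lvl = fRef lvl := by
  intro n
  induction n with
  | zero => intro lvl h1 h2; omega
  | succ n ih =>
    intro lvl h1 h2
    cases h : hpStr? lvl with
    | some s =>
      have hd : duccLoop (n + 1) lvl = s := by simp [duccLoop, h]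
      rw [hd]
      unfold hpStr? at h
      split_ifs at h <;>
        (injection h with h'; subst h'; unfold fRef; split_ifs <;> first | rfl | omega)
    | none =>
      have hd : duccLoop (n + 1) lvl = duccLoop n (lvl - 1) := by simp [duccLoop, h]
      unfold hpStr? at h
      split_ifs at h
      rw [hd, ih (lvl - 1) (by omega) (by push_cast at h2 ⊢; omega)]
      unfold fRef; split_ifs <;> first | rfl | omega

theorem alt_eq_fRef (lvl : Int) (h : 0 ≤ lvl) : ducc_hp_to_str_alt lvl = fRef lvl := by
  by_cases c100 : (100:Int) ≤ lvl
  · 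
    have f0 : (0:Int) ≤ lvl := by omega
    have f7 : (7:Int) ≤ lvl := by omega
    have f14 : (14:Int) ≤ lvl := by omega
    have f35 : (35:Int) ≤ lvl := by omega
    have f42 : (42:Int) ≤ lvl := by omega
    have f70 : (70:Int) ≤ lvl := by omega
    have f84 : (84:Int) ≤ lvl := by omega
    have f100 : (100:Int) ≤ lvl := by omega
    simp [ducc_hp_to_str_alt, duccBS, duccKeys, duccVals, fRef, PySem.List.pyGet?, PySem.List.pyIdx?, f0, f7, f14, f35, f42, f70, f84, f100]
  ·
    by_cases c84 : (84:Int) ≤ lvl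
    · 
      have f0 : (0:Int) ≤ lvl := by omega
      have f7 : (7:Int) ≤ lvl := by omega
      have f14 : (14:Int) ≤ lvl := by omega
      have f35 : (35:Int) ≤ lvl := by omega
      have f42 : (42:Int) ≤ lvl := by omega
      have f70 : (70:Int) ≤ lvl := by omega
      have f84 : (84:Int) ≤ lvl := by omega
      have f100 : ¬ ((100:Int) ≤ lvl) := by omega
      simp [ducc_hp_to_str_alt, duccBS, duccKeys, duccVals, fRef, PySem.List.pyGet?, PySem.List.pyIdx?, f0, f7, f14, f35, f42, f70, f84, f100]
    ·
      by_cases c70 : (70:Int) ≤ lvl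
      · 
        have f0 : (0:Int) ≤ lvl := by omega
        have f7 : (7:Int) ≤ lvl := by omega
        have f14 : (14:Int) ≤ lvl := by omega
        have f35 : (35:Int) ≤ lvl := by omega
        have f42 : (42:Int) ≤ lvl := by omega
        have f70 : (70:Int) ≤ lvl := by omega
        have f84 : ¬ ((84:Int) ≤ lvl) := by omega
        have f100 : ¬ ((100:Int) ≤ lvl) := by omega
        simp [ducc_hp_to_str_alt, duccBS, duccKeys, duccVals, fRef, PySem.List.pyGet?, PySem.List.pyIdx?, f0, f7, f14, f35, f42, f70, f84, f100]
      ·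
        by_cases c42 : (42:Int) ≤ lvl
        · 
          have f0 : (0:Int) ≤ lvl := by omega
          have f7 : (7:Int) ≤ lvl := by omega
          have f14 : (14:Int) ≤ lvl := by omega
          have f35 : (35:Int) ≤ lvl := by omega
          have f42 : (42:Int) ≤ lvl := by omega
          have f70 : ¬ ((70:Int) ≤ lvl) := by omega
          have f84 : ¬ ((84:Int) ≤ lvl) := by omega
          have f100 : ¬ ((100:Int) ≤ lvl) := by omega
          simp [ducc_hp_to_str_alt, duccBS, duccKeys, duccVals, fRef, PySem.List.pyGet?, PySem.List.pyIdx?, f0, f7, f14, f35, f42, f70, f84, f100]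
        ·
          by_cases c35 : (35:Int) ≤ lvl
          · 
            have f0 : (0:Int) ≤ lvl := by omega
            have f7 : (7:Int) ≤ lvl := by omega
            have f14 : (14:Int) ≤ lvl := by omega
            have f35 : (35:Int) ≤ lvl := by omega
            have f42 : ¬ ((42:Int) ≤ lvl) := by omega
            have f70 : ¬ ((70:Int) ≤ lvl) := by omega
            have f84 : ¬ ((84:Int) ≤ lvl) := by omega
            have f100 : ¬ ((100:Int) ≤ lvl) := by omega
            simp [ducc_hp_to_str_alt, duccBS, duccKeys, duccVals, fRef, PySem.List.pyGet?, PySem.List.pyIdx?, f0, f7, f14, f35, f42, f70, f84, f100]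
          ·
            by_cases c14 : (14:Int) ≤ lvl
            · 
              have f0 : (0:Int) ≤ lvl := by omega
              have f7 : (7:Int) ≤ lvl := by omega
              have f14 : (14:Int) ≤ lvl := by omega
              have f35 : ¬ ((35:Int) ≤ lvl) := by omega
              have f42 : ¬ ((42:Int) ≤ lvl) := by omega
              have f70 : ¬ ((70:Int) ≤ lvl) := by omega
              have f84 : ¬ ((84:Int) ≤ lvl) := by omega
              have f100 : ¬ ((100:Int) ≤ lvl) := by omega
              simp [ducc_hp_to_str_alt, duccBS, duccKeys, duccVals, fRef, PySem.List.pyGet?, PySem.List.pyIdx?, f0, f7, f14, f35, f42, f70, f84, f100]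
            ·
              by_cases c7 : (7:Int) ≤ lvl
              · 
                have f0 : (0:Int) ≤ lvl := by omega
                have f7 : (7:Int) ≤ lvl := by omega
                have f14 : ¬ ((14:Int) ≤ lvl) := by omega
                have f35 : ¬ ((35:Int) ≤ lvl) := by omega
                have f42 : ¬ ((42:Int) ≤ lvl) := by omega
                have f70 : ¬ ((70:Int) ≤ lvl) := by omega
                have f84 : ¬ ((84:Int) ≤ lvl) := by omega
                have f100 : ¬ ((100:Int) ≤ lvl) := by omega
                simp [ducc_hp_to_str_alt, duccBS, duccKeys, duccVals, fRef, PySem.List.pyGet?, PySem.List.pyIdx?, f0, f7, f14, f35, f42, f70, f84, f100]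
              ·
                have f0 : (0:Int) ≤ lvl := by omega
                have f7 : ¬ ((7:Int) ≤ lvl) := by omega
                have f14 : ¬ ((14:Int) ≤ lvl) := by omega
                have f35 : ¬ ((35:Int) ≤ lvl) := by omega
                have f42 : ¬ ((42:Int) ≤ lvl) := by omega
                have f70 : ¬ ((70:Int) ≤ lvl) := by omega
                have f84 : ¬ ((84:Int) ≤ lvl) := by omega
                have f100 : ¬ ((100:Int) ≤ lvl) := by omega
                simp [ducc_hp_to_str_alt, duccBS, duccKeys, duccVals, fRef, PySem.List.pyGet?, PySem.List.pyIdx?, f0, f7, f14, f35, f42, f70, f84, f100]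

-- ===== VERDICT =====
theorem ducc_hp_to_str_spec : Claim_equal_ducc_hp_to_str := by
  intro lvl _ hpre
  unfold Spec_ducc_hp_to_str ducc_hp_to_str
  rw [duccLoop_eq_fRef (lvl.toNat + 1) lvl hpre (by omega), alt_eq_fRef lvl hpre]
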